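-- pv_equiv track=rewrite | github.com/qMSUZ/QDCLIB | entdetector.py | partititon_disp
-- ===== SOURCE A (Python) =====
-- def partititon_disp(kappa):
--         n=len(kappa)
--         m=max(kappa)
--         fstr=""
--         for j in range(0, m+1):
--                 string='('
--                 for i in range(0,n):
--                         if kappa[i]==j:
--                                 string=string+str(i)+','
--                 string=string[0:len(string)-1]
--                 string=string+')'
--                 fstr=fstr +string
--         return '{'+fstr+'}'
-- ===== SOURCE B (Python) =====
-- def partititon_disp(kappa):
--     m = max(kappa)
--     buckets = [[] for _ in range(m + 1)]
--     for i, v in enumerate(kappa):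
--         if v >= 0:
--             buckets[v].append(str(i))
--     out = []
--     for b in buckets:
--         s = '(' + ''.join(x + ',' for x in b)
--         out.append(s[:-1] + ')')
--     return '{' + ''.join(out) + '}'
-- ===== Notes on version B (the rewrite author's own statement) =====
-- stated objective: faster
-- what changed: A rescans the whole list once per value j in 0..max(kappa); B makes a single bucketing pass over enumerate(kappa) into max+1 buckets and then renders each bucket once.
import Mathlib
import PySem

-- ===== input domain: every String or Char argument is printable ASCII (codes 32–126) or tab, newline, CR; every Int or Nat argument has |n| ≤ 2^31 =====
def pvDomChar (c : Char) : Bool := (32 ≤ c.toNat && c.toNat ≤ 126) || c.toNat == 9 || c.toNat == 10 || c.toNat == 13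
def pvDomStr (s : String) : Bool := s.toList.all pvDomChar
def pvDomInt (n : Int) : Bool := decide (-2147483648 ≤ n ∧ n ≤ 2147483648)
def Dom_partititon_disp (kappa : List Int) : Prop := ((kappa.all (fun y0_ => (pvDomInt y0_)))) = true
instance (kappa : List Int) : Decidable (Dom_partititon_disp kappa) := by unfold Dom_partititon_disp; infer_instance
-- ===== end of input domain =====

-- B replaces A's scan of the whole list for every value 0..max(kappa) by a single bucketing
-- pass over enumerate(kappa); return values agree exactly (including A's ')' rendering of an
-- empty group, which is A's output format here).

-- ===== PORT A =====
def partititon_disp (kappa : List Int) : String :=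
  let n : Int := PySem.List.len kappa
  match PySem.List.max? kappa (fun x => x) with
  | none => ""   -- Python's max([]) raises ValueError: excluded by Pre_
  | some m =>
    let fstr : List Char :=
      (PySem.List.pyRange 0 (m + 1) 1).foldl (fun fstr j =>
        let s : List Char :=
          (PySem.List.pyRange 0 n 1).foldl (fun s i =>
            if PySem.List.pyGetD kappa i 0 = j then s ++ PySem.Int.toChars i ++ [','] else s)
            ['(']
        let s := PySem.List.slice s (some 0) (some (PySem.List.len s - 1))
        let s := s ++ [')']
        fstr ++ s) []
    String.ofList ('{' :: (fstr ++ ['}']))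

-- ===== PORT B =====
def partititon_disp_alt (kappa : List Int) : String :=
  match PySem.List.max? kappa (fun x => x) with
  | none => ""   -- Python's max([]) raises ValueError: excluded by Pre_
  | some m =>
    let buckets : List (List (List Char)) :=
      (PySem.List.enumerate kappa).foldl
        (fun bs p =>
          if 0 ≤ p.2 then bs.modify p.2.toNat (fun b => b ++ [PySem.Int.toChars p.1]) else bs)
        ((PySem.List.pyRange 0 (m + 1) 1).map (fun _ => []))
    let out : List (List Char) :=
      buckets.foldl (fun out b =>
        let s : List Char := '(' :: (b.map (fun x => x ++ [','])).flatten
        out ++ [PySem.List.slice s none (some (-1)) ++ [')']]) []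
    String.ofList ('{' :: (out.flatten ++ ['}']))

-- ===== PRECONDITION & SPEC =====
-- Pre_ excludes only the empty list, on which the Python A (and B) raises ValueError in max().
def Pre_partititon_disp (kappa : List Int) : Prop := kappa ≠ []
instance (kappa : List Int) : Decidable (Pre_partititon_disp kappa) := by
  unfold Pre_partititon_disp; infer_instance
def pvWitness_partititon_disp : List Int := [0, 1, 1, 3]
def Spec_partititon_disp (kappa : List Int) (out : String) : Prop := out = partititon_disp_alt kappa
instance (kappa : List Int) (out : String) : Decidable (Spec_partititon_disp kappa out) := by
  unfold Spec_partititon_disp; infer_instance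

-- ===== CLAIM (what is proved, stated in full; the proofs are below) =====
def Claim_equal_partititon_disp : Prop := ∀ (kappa : List Int), Dom_partititon_disp kappa → Pre_partititon_disp kappa → Spec_partititon_disp kappa (partititon_disp kappa)

-- ===== LEMMAS AND PROOFS =====

-- indices (as digit strings) grouped under value j, in order of appearance
def pvIdxChars (kappa : List Int) (j : Int) : List (List Char) :=
  ((PySem.List.enumerate kappa).filter (fun p => p.2 == j)).map (fun p => PySem.Int.toChars p.1)

-- the common per-group rendering
def pvFmt (b : List (List Char)) : List Char :=
  ('(' :: (b.map (fun x => x ++ [','])).flatten).dropLast ++ [')']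

-- B's bucket-building step
def pvStep (bs : List (List (List Char))) (p : Int × Int) : List (List (List Char)) :=
  if 0 ≤ p.2 then bs.modify p.2.toNat (fun b => b ++ [PySem.Int.toChars p.1]) else bs

lemma pvStep_length (bs : List (List (List Char))) (p : Int × Int) :
    (pvStep bs p).length = bs.length := by
  unfold pvStep; split <;> simp

lemma pvBuckets_length (l : List (Int × Int)) (B : List (List (List Char))) :
    (l.foldl pvStep B).length = B.length := by
  induction l generalizing B with
  | nil => rfl
  | cons p l ih => simpa [List.foldl, pvStep_length] using ih (pvStep B p)

lemma pvBuckets_get (l : List (Int × Int)) (B : List (List (List Char))) (j : Nat)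
    (hj : j < B.length) :
    (l.foldl pvStep B)[j]'(by simpa [pvBuckets_length] using hj) =
      B[j] ++ ((l.filter (fun p => p.2 == (j : Int))).map (fun p => PySem.Int.toChars p.1)) := by
  induction l generalizing B with
  | nil => simp
  | cons p l ih =>
    rcases p with ⟨s, v⟩
    have hj' : j < (pvStep B (s, v)).length := by simpa [pvStep_length] using hj
    have := ih (pvStep B (s, v)) hj'
    simp only [List.foldl_cons]
    rw [this]
    by_cases hv : v = (j : Int)
    · have h0 : (0 : Int) ≤ v := by omega
      have hN : v.toNat = j := by omega
      simp [pvStep, h0, hv]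
    · have hne : (decide (v = (j : Int))) = false := by simpa using hv
      have hB : (pvStep B (s, v))[j]'hj' = B[j] := by
        unfold pvStep
        split
        · rename_i h0
          have hN : v.toNat ≠ j := by omega
          simp [hN]
        · rfl
      simp [hB, hv]

lemma pvBuckets_eq (kappa : List Int) (m : Int) :
    ((PySem.List.enumerate kappa).foldl pvStep
        ((PySem.List.pyRange 0 (m + 1) 1).map (fun _ => ([] : List (List Char))))) =
      (PySem.List.pyRange 0 (m + 1) 1).map (fun j => pvIdxChars kappa j) := by
  apply List.ext_getElem
  · simp [pvBuckets_length]
  · intro j h1 h2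
    have hj : j < ((PySem.List.pyRange 0 (m + 1) 1).map
        (fun _ => ([] : List (List Char)))).length := by
      simpa [pvBuckets_length] using h1
    rw [pvBuckets_get _ _ j hj]
    have hjr : j < (PySem.List.pyRange 0 (m + 1) 1).length := by simpa using hj
    simp [pvIdxChars, PySem.List.getElem_pyRange_one]

-- A's inner loop over range(0, n) collects exactly the indices whose kappa-value is j
lemma pvInner_eq (kappa : List Int) (j : Int) :
    ((PySem.List.pyRange 0 (PySem.List.len kappa) 1).foldl (fun s i =>
        if PySem.List.pyGetD kappa i 0 = j then s ++ PySem.Int.toChars i ++ [','] else s)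
        ['(']) =
      '(' :: ((pvIdxChars kappa j).map (fun x => x ++ [','])).flatten := by
  have hcg : ∀ (s : List Char) (i : Int),
      (if PySem.List.pyGetD kappa i 0 = j then s ++ PySem.Int.toChars i ++ [','] else s) =
      (if PySem.List.pyGetD kappa i 0 = j then s ++ (PySem.Int.toChars i ++ [',']) else s) := by
    intro s i; split <;> simp
  rw [PySem.List.foldl_congr_mem _ _
    (fun s i => if PySem.List.pyGetD kappa i 0 = j then s ++ (PySem.Int.toChars i ++ [',']) else s)
    _ (fun s i _ => hcg s i)]
  rw [PySem.List.foldl_ite_eq_foldl_filter (fun i => PySem.List.pyGetD kappa i 0 = j)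
    (fun acc i => acc ++ (PySem.Int.toChars i ++ [',']))]
  rw [PySem.List.foldl_append_eq_flatMap]
  rw [pvIdxChars, PySem.List.enumerate_eq_map_pyRange kappa 0, List.filter_map, List.map_map,
    List.map_map]
  simp only [List.flatMap_def, Function.comp_def, PySem.List.len_eq]
  simp [Bool.beq_eq_decide_eq]

lemma pvSlice_fmt (b : List (List Char)) :
    PySem.List.slice ('(' :: (b.map (fun x => x ++ [','])).flatten) (some 0)
        (some (PySem.List.len ('(' :: (b.map (fun x => x ++ [','])).flatten) - 1)) ++ [')'] =
      pvFmt b := by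
  set s : List Char := '(' :: (b.map (fun x => x ++ [','])).flatten with hs
  have hlen : (0 : Int) ≤ (s.length : Int) - 1 := by
    have : 0 < s.length := by simp [hs]
    omega
  rw [pvFmt, ← hs]
  rw [PySem.List.slice_zero_start, PySem.List.len_eq, PySem.List.slice_to _ hlen]
  have : ((s.length : Int) - 1).toNat = s.length - 1 := by omega
  rw [this, ← List.dropLast_eq_take]


lemma pvA_eq (kappa : List Int) (m : Int)
    (hmax : PySem.List.max? kappa (fun x => x) = some m) :
    partititon_disp kappa =
      String.ofList ('{' ::
        ((PySem.List.pyRange 0 (m + 1) 1).flatMap (fun j => pvFmt (pvIdxChars kappa j)) ++ ['}'])) := by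
  unfold partititon_disp
  rw [hmax]
  simp only [pvInner_eq, pvSlice_fmt]
  rw [PySem.List.foldl_append_eq_flatMap (g := fun j => pvFmt (pvIdxChars kappa j))]
  simp

lemma pvB_eq (kappa : List Int) (m : Int)
    (hmax : PySem.List.max? kappa (fun x => x) = some m) :
    partititon_disp_alt kappa =
      String.ofList ('{' ::
        ((PySem.List.pyRange 0 (m + 1) 1).flatMap (fun j => pvFmt (pvIdxChars kappa j)) ++ ['}'])) := by
  unfold partititon_disp_alt
  rw [hmax]
  simp only [PySem.List.slice_to_neg_one]
  rw [show (fun (bs : List (List (List Char))) (p : Int × Int) =>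
        if 0 ≤ p.2 then bs.modify p.2.toNat (fun b => b ++ [PySem.Int.toChars p.1]) else bs) =
      pvStep from rfl]
  rw [pvBuckets_eq kappa m]
  rw [show (fun (out : List (List Char)) (b : List (List Char)) =>
        out ++ [('(' :: (b.map (fun x => x ++ [','])).flatten).dropLast ++ [')']]) =
      (fun out b => out ++ [pvFmt b]) from rfl]
  rw [PySem.List.foldl_append_singleton_eq_map (f := fun b => pvFmt b)]
  simp [List.flatMap_def, Function.comp_def]

-- ===== VERDICT (by name: the statement is the Claim_ definition above) =====
theorem partititon_disp_spec : Claim_equal_partititon_disp := by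
  intro kappa _hdom hpre
  unfold Spec_partititon_disp
  cases hmax : PySem.List.max? kappa (fun x => x) with
  | none => exact absurd ((PySem.List.max?_eq_none_iff _ _).mp hmax) hpre
  | some m => rw [pvA_eq kappa m hmax, pvB_eq kappa m hmax]
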